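-- pv_equiv track=rewrite | github.com/REKATRON1/BWInf23 | Aufgabe 2-Implementierung/sidefunc.py | prod_combinations_intern
-- ===== SOURCE A (Python) =====
-- def prod_combinations_intern(arr, i):
-- 	if i < len(arr):
-- 		comb = []
-- 		rec_comb = prod_combinations_intern(arr, i+1)
-- 		comb.extend(rec_comb)
-- 		for n in rec_comb:
-- 			comb.append(n*arr[i])
-- 		return comb
-- 	return [1]
-- ===== SOURCE B (Python) =====
-- def prod_combinations_intern(arr, i):
--     result = [1]
--     j = len(arr) - 1
--     while j >= i:
--         result = result + [x * arr[j] for x in result]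
--         j -= 1
--     return result
-- ===== Notes on version B (the rewrite author's own statement) =====
-- stated objective: alternative
-- what changed: Replaces the top-down recursion with an iterative bottom-up while loop that walks the indices from len(arr)-1 down to i, doubling an accumulator list instead of recursing.
import Mathlib
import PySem

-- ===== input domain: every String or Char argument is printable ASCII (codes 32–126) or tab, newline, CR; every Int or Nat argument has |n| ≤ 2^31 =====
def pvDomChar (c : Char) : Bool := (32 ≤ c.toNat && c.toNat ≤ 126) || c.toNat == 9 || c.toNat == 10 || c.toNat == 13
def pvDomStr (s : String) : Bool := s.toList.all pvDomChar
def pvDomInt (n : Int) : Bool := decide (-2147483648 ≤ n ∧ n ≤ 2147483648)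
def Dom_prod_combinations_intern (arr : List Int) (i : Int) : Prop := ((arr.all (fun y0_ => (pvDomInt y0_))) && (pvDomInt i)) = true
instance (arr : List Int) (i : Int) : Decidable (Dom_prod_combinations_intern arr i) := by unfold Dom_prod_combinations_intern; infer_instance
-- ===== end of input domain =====

-- B replaces A's top-down recursion by an iterative bottom-up accumulator loop; same cost, different decomposition.

-- ===== PORT A =====
-- literal port of A's recursion; arr[i] is pyGet? (none = IndexError, excluded by Pre_)
def prod_combinations_intern (arr : List Int) (i : Int) : List Int :=
  if _h : i < (arr.length : Int) then
    let rec_comb := prod_combinations_intern arr (i + 1)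
    rec_comb ++ rec_comb.map (fun n => n * (PySem.List.pyGet? arr i).getD 0)
  else [1]
termination_by ((arr.length : Int) - i).toNat
decreasing_by omega

-- ===== PORT B =====
-- the while loop of Source B: j counts down from len(arr)-1 to i, doubling result each step
def pvLoopB (arr : List Int) (i : Int) (j : Int) (result : List Int) : List Int :=
  if _h : j ≥ i then
    pvLoopB arr i (j - 1) (result ++ result.map (fun x => x * (PySem.List.pyGet? arr j).getD 0))
  else result
termination_by (j - i + 1).toNat
decreasing_by omega

def prod_combinations_intern_alt (arr : List Int) (i : Int) : List Int :=
  pvLoopB arr i ((arr.length : Int) - 1) [1]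

-- ===== PRECONDITION & SPEC =====
-- Pre_ excludes exactly the inputs where Python A raises IndexError (i below -len(arr)).
def Pre_prod_combinations_intern (arr : List Int) (i : Int) : Prop := -(arr.length : Int) ≤ i
instance (arr : List Int) (i : Int) : Decidable (Pre_prod_combinations_intern arr i) := by
  unfold Pre_prod_combinations_intern; infer_instance

def pvWitness_prod_combinations_intern : List Int × Int := ([2, 3, 5], 1)

def Spec_prod_combinations_intern (arr : List Int) (i : Int) (out : List Int) : Prop := out = prod_combinations_intern_alt arr i
instance (arr : List Int) (i : Int) (out : List Int) : Decidable (Spec_prod_combinations_intern arr i out) := by unfold Spec_prod_combinations_intern; infer_instance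

-- ===== CLAIM (what is proved, stated in full; the proofs are below) =====
def Claim_equal_prod_combinations_intern : Prop := ∀ (arr : List Int) (i : Int), Dom_prod_combinations_intern arr i → Pre_prod_combinations_intern arr i → Spec_prod_combinations_intern arr i (prod_combinations_intern arr i)

-- ===== LEMMAS AND PROOFS =====

-- pulling one loop step (the lowest index i) out of the front of the loop
theorem pvLoopB_commute (arr : List Int) :
    ∀ (n : Nat) (i j : Int) (acc : List Int), (j - i).toNat = n → i ≤ j →
    pvLoopB arr i j acc =
      pvLoopB arr (i + 1) j acc ++
        (pvLoopB arr (i + 1) j acc).map (fun x => x * (PySem.List.pyGet? arr i).getD 0) := by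
  intro n
  induction n with
  | zero =>
    intro i j acc hn hij
    have hji : i = j := by omega
    subst hji
    rw [pvLoopB]
    simp only [dif_pos (le_refl i)]
    rw [pvLoopB]
    simp only [dif_neg (by omega : ¬ (i - 1 ≥ i))]
    conv_rhs => rw [pvLoopB]
    simp only [dif_neg (by omega : ¬ (i ≥ i + 1))]
  | succ n ih =>
    intro i j acc hn hij
    have hij' : i + 1 ≤ j := by omega
    rw [pvLoopB]
    simp only [dif_pos (by omega : j ≥ i)]
    rw [ih i (j - 1) _ (by omega) (by omega)]
    conv_rhs => rw [pvLoopB]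
    simp only [dif_pos (by omega : j ≥ i + 1)]

theorem portA_eq_loop (arr : List Int) :
    ∀ (n : Nat) (i : Int), ((arr.length : Int) - i).toNat = n →
    prod_combinations_intern arr i = pvLoopB arr i ((arr.length : Int) - 1) [1] := by
  intro n
  induction n with
  | zero =>
    intro i hn
    have hge : ¬ i < (arr.length : Int) := by omega
    rw [prod_combinations_intern, pvLoopB]
    simp only [dif_neg hge, dif_neg (by omega : ¬ ((arr.length : Int) - 1 ≥ i))]
  | succ n ih =>
    intro i hn
    have hlt : i < (arr.length : Int) := by omega
    rw [prod_combinations_intern]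
    simp only [dif_pos hlt]
    rw [ih (i + 1) (by omega)]
    rw [pvLoopB_commute arr ((arr.length : Int) - 1 - i).toNat i ((arr.length : Int) - 1) [1] rfl
      (by omega)]

-- ===== VERDICT (by name: the statement is the Claim_ definition above) =====
theorem prod_combinations_intern_spec : Claim_equal_prod_combinations_intern := by
  intro arr i _ _
  unfold Spec_prod_combinations_intern prod_combinations_intern_alt
  exact portA_eq_loop arr _ i rfl
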